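-- pv_equiv track=rewrite | github.com/EricBastos/Tetris-RL | tetris/rl/dqn/dqn_agent.py | _decode_action
-- ===== SOURCE A (Python) =====
-- def _decode_action(q_index):
--     rotation = 0
--     while q_index >= 220:
--         q_index -= 220
--         rotation += 1
--     line = 0
--     while q_index >= 11:
--         q_index -= 11
--         line += 1
--     column = q_index
--     return [line + 20, column - 1, rotation]
-- ===== SOURCE B (Python) =====
-- def _decode_action(q_index):
--     rotation, rem = divmod(q_index, 220)
--     line, column = divmod(rem, 11)
--     return [line + 20, column - 1, rotation]
-- ===== Notes on version B (the rewrite author's own statement) =====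
-- stated objective: idiomatic
-- what changed: Replaces the two repeated-subtraction counting loops with two closed-form divmod computations.
-- outside the precondition, e.g. on _decode_action(-5): A returns [20, -6, 0], B returns [39, 5, -1]
import Mathlib
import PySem

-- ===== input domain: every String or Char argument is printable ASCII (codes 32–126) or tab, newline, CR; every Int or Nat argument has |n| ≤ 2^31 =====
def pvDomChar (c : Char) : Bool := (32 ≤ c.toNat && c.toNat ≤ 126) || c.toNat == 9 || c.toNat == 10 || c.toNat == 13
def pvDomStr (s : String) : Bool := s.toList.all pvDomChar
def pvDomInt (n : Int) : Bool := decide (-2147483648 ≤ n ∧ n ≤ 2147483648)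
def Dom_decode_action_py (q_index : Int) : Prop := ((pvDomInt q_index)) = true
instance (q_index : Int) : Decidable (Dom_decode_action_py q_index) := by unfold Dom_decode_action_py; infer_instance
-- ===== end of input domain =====

-- B replaces A's two repeated-subtraction loops with closed-form divmod; equal on non-negative action indices (Pre_).


-- ===== PORT A =====
-- 'while q_index >= 220: q_index -= 220; rotation += 1'
def decodeLoop220 (q rotation : Int) : Int × Int :=
  if q ≥ 220 then decodeLoop220 (q - 220) (rotation + 1) else (q, rotation)
termination_by q.toNat
decreasing_by omega

-- 'while q_index >= 11: q_index -= 11; line += 1'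
def decodeLoop11 (q line : Int) : Int × Int :=
  if q ≥ 11 then decodeLoop11 (q - 11) (line + 1) else (q, line)
termination_by q.toNat
decreasing_by omega

def decode_action_py (q_index : Int) : List Int :=
  let (q1, rotation) := decodeLoop220 q_index 0
  let (column, line) := decodeLoop11 q1 0
  [line + 20, column - 1, rotation]

-- ===== PORT B =====
-- divmod(q, 220) / divmod(rem, 11): divisors are the nonzero literals 220 and 11,
-- so divmod is ported exactly as the (floordiv, mod) pair.
def decode_action_py_alt (q_index : Int) : List Int :=
  let rotation := PySem.Int.floordiv q_index 220
  let rem := PySem.Int.mod q_index 220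
  let line := PySem.Int.floordiv rem 11
  let column := PySem.Int.mod rem 11
  [line + 20, column - 1, rotation]

-- ===== PRECONDITION & SPEC =====
-- Pre_ restricts to non-negative action indices, the function's natural domain (valid DQN
-- action indices are 0..879). On negative indices A returns a value too (the loops never run,
-- leaving rotation = line = 0) while B floors toward -infinity; neither value is specified
-- for a negative action index, so those inputs are excluded as a defensible-corner artefact.
def Pre_decode_action_py (q_index : Int) : Prop := 0 ≤ q_index
instance (q_index : Int) : Decidable (Pre_decode_action_py q_index) := by unfold Pre_decode_action_py; infer_instance
def pvWitness_decode_action_py : Int := (233)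
def Spec_decode_action_py (q_index : Int) (out : List Int) : Prop := out = decode_action_py_alt q_index
instance (q_index : Int) (out : List Int) : Decidable (Spec_decode_action_py q_index out) := by unfold Spec_decode_action_py; infer_instance

-- ===== CLAIM (what is proved, stated in full; the proofs are below) =====
def Claim_equal_decode_action_py : Prop := ∀ (q_index : Int), Dom_decode_action_py q_index → Pre_decode_action_py q_index → Spec_decode_action_py q_index (decode_action_py q_index)

-- ===== LEMMAS AND PROOFS =====
-- Each subtraction loop computes (remainder, accumulator + quotient), in Euclidean form (0 ≤ q).
theorem decodeLoop220_eq (q r : Int) (hq : 0 ≤ q) :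
    decodeLoop220 q r = (q % 220, r + q / 220) := by
  induction q, r using decodeLoop220.induct with
  | case1 q r h ih =>
    rw [decodeLoop220, if_pos h, ih (by omega), Prod.mk.injEq]
    omega
  | case2 q r h =>
    rw [decodeLoop220, if_neg h, Prod.mk.injEq]
    omega

theorem decodeLoop11_eq (q r : Int) (hq : 0 ≤ q) :
    decodeLoop11 q r = (q % 11, r + q / 11) := by
  induction q, r using decodeLoop11.induct with
  | case1 q r h ih =>
    rw [decodeLoop11, if_pos h, ih (by omega), Prod.mk.injEq]
    omega
  | case2 q r h =>
    rw [decodeLoop11, if_neg h, Prod.mk.injEq]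
    omega

-- ===== VERDICT (by name: the statement is the Claim_ definition above) =====
theorem decode_action_py_spec : Claim_equal_decode_action_py := by
  intro q _ hq
  have h220 : (0:Int) < 220 := by omega
  have h11 : (0:Int) < 11 := by omega
  unfold Spec_decode_action_py decode_action_py decode_action_py_alt
  simp only [decodeLoop220_eq q 0 hq, decodeLoop11_eq (q % 220) 0 (Int.emod_nonneg q (by omega)),
      PySem.Int.floordiv_eq_ediv_of_pos h220, PySem.Int.mod_eq_emod_of_pos h220,
      PySem.Int.floordiv_eq_ediv_of_pos h11, PySem.Int.mod_eq_emod_of_pos h11]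
  simp
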